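-- pv_equiv track=rewrite | github.com/juhongyee/baekjoon | 273 최대사이클 1(미완)/최대사이클 1.py | solve
-- ===== SOURCE A (Python) =====
-- import math
--
-- calcul_list = [0,1,1]
--
-- i = 3
--
-- def solve(n,k):
--     ans = 0
--     before = 1
--     if k== 1:
--         ans += calcul_list[1]*math.factorial(n-1)
--     else:
--         before = calcul_list[2]
--         ans += calcul_list[2]*math.factorial(n-2)
--         for i in range(3,k+1):
--             ans += (k-(i-1))*before*(i-1)*math.factorial(n-i)
--             before = (k-(i-1))*before*(i-1)
--
--     return ans
-- ===== SOURCE B (Python) =====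
-- import math
--
-- def solve(n, k):
--     if k == 1:
--         return math.factorial(n - 1)
--     if k <= 2:
--         return math.factorial(n - 2)
--     # Horner evaluation: factor (n-k)! out of every term and fold the
--     # coefficient recurrence c_i = c_{i-1} * (i-1) * (k-i+1) into the scheme.
--     acc = 1
--     c = 1
--     for i in range(3, k + 1):
--         c *= (i - 1) * (k - i + 1)
--         acc = acc * (n - i + 1) + c
--     return acc * math.factorial(n - k)
-- ===== Notes on version B (the rewrite author's own statement) =====
-- stated objective: alternative
-- what changed: B evaluates the sum by a Horner scheme on the falling-factorial basis: it factors (n-k)! out of every term and folds the coefficient recurrence c *= (i-1)*(k-i+1) into the accumulator (acc = acc*(n-i+1) + c), so no individual term and no per-iteration factorial is ever formed; A instead computes and adds each full-size term with a threaded product.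
import Mathlib
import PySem

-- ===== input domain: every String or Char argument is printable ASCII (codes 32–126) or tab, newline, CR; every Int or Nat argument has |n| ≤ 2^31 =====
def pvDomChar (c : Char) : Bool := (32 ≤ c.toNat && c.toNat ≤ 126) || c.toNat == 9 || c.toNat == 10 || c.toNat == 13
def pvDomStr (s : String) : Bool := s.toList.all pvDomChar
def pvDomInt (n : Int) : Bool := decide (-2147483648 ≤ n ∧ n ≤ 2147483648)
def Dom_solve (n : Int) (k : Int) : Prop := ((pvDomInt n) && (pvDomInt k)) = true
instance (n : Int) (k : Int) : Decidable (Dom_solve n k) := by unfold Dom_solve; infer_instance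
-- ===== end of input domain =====

-- B evaluates the sum by a Horner scheme: it factors (n-k)! out of every term and
-- folds the coefficient recurrence into the accumulator, never forming a full term
-- (alternative algorithm; one factorial call instead of one per iteration).

-- math.factorial, exact for m ≥ 0 (Pre_solve excludes every negative argument,
-- where Python raises ValueError)
def pyFact (m : Int) : Int := if m < 0 then 0 else (Nat.factorial m.toNat : Int)

-- ===== PORT A =====
-- A's loop body: state (ans, before)
def bodyA (n k : Int) (st : Int × Int) (i : Int) : Int × Int :=
  (st.1 + (k - (i - 1)) * st.2 * (i - 1) * pyFact (n - i),
   (k - (i - 1)) * st.2 * (i - 1))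

def solve (n : Int) (k : Int) : Int :=
  if k = 1 then 0 + 1 * pyFact (n - 1)          -- calcul_list[1] = 1
  else ((PySem.List.pyRange 3 (k + 1) 1).foldl (bodyA n k)
          (0 + 1 * pyFact (n - 2), 1)).1        -- calcul_list[2] = 1, before = calcul_list[2]

-- ===== PORT B =====
-- B's loop body: state (acc, c); c is updated first, then the Horner step
def bodyB (n k : Int) (st : Int × Int) (i : Int) : Int × Int :=
  let c' := st.2 * ((i - 1) * (k - i + 1))
  (st.1 * (n - i + 1) + c', c')

def solve_alt (n : Int) (k : Int) : Int :=
  if k = 1 then pyFact (n - 1)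
  else if k ≤ 2 then pyFact (n - 2)
  else ((PySem.List.pyRange 3 (k + 1) 1).foldl (bodyB n k) (1, 1)).1 * pyFact (n - k)

-- ===== PRECONDITION & SPEC =====
-- Exactly the inputs where A's math.factorial calls all get nonnegative arguments
-- (elsewhere A raises ValueError).
def Pre_solve (n : Int) (k : Int) : Prop :=
  (k = 1 ∧ 1 ≤ n) ∨ (k ≠ 1 ∧ 2 ≤ n ∧ (3 ≤ k → k ≤ n))
instance (n : Int) (k : Int) : Decidable (Pre_solve n k) := by unfold Pre_solve; infer_instance

def pvWitness_solve : Int × Int := (5, 3)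

def Spec_solve (n : Int) (k : Int) (out : Int) : Prop := out = solve_alt n k
instance (n : Int) (k : Int) (out : Int) : Decidable (Spec_solve n k out) := by unfold Spec_solve; infer_instance

-- ===== CLAIM (what is proved, stated in full; the proofs are below) =====
def Claim_equal_solve : Prop := ∀ (n : Int) (k : Int), Dom_solve n k → Pre_solve n k → Spec_solve n k (solve n k)

-- ===== LEMMAS AND PROOFS =====

theorem pyFact_succ (m : Int) (h : 0 ≤ m) : pyFact (m + 1) = (m + 1) * pyFact m := by
  have h1 : ¬ (m + 1 < 0) := by omega
  have h2 : ¬ (m < 0) := by omega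
  have h3 : (m + 1).toNat = m.toNat + 1 := by omega
  simp only [pyFact, if_neg h1, if_neg h2, h3, Nat.factorial_succ]
  push_cast
  rw [Int.toNat_of_nonneg h]

-- Loop invariant: after processing i = 3 … m (m = 2 + t ≤ k ≤ n),
-- A's ans equals B's acc times (n - m)! and A's before equals B's c.
theorem loop_inv (n k : Int) (hkn : k ≤ n) :
    ∀ t : Nat, 2 + (t : Int) ≤ k →
      ((PySem.List.pyRange 3 (2 + (t : Int) + 1) 1).foldl (bodyA n k) (pyFact (n - 2), 1)).1
        = ((PySem.List.pyRange 3 (2 + (t : Int) + 1) 1).foldl (bodyB n k) (1, 1)).1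
            * pyFact (n - (2 + (t : Int)))
      ∧ ((PySem.List.pyRange 3 (2 + (t : Int) + 1) 1).foldl (bodyA n k) (pyFact (n - 2), 1)).2
        = ((PySem.List.pyRange 3 (2 + (t : Int) + 1) 1).foldl (bodyB n k) (1, 1)).2 := by
  intro t
  induction t with
  | zero =>
      intro _
      rw [show (2 : Int) + (0 : Nat) + 1 = 3 by norm_num,
          PySem.List.pyRange_one_eq_nil (by norm_num)]
      simp
  | succ t ih =>
      intro hle
      have hle' : 2 + (t : Int) ≤ k := by push_cast at hle ⊢; omega
      obtain ⟨ih1, ih2⟩ := ih hle'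
      set m : Int := 2 + (t : Int) with hm
      have hms : 2 + ((t + 1 : Nat) : Int) = m + 1 := by push_cast; omega
      rw [hms]
      have hsplit : PySem.List.pyRange 3 (m + 1 + 1) 1
          = PySem.List.pyRange 3 (m + 1) 1 ++ [m + 1] :=
        PySem.List.pyRange_one_succ_right (by omega)
      rw [hsplit, List.foldl_append, List.foldl_append]
      have hfs : pyFact (n - m) = (n - m) * pyFact (n - m - 1) := by
        have := pyFact_succ (n - m - 1) (by omega)
        rw [show n - m - 1 + 1 = n - m from by omega] at this
        exact this
      constructor
      · simp only [List.foldl, bodyA, bodyB, ih1, ih2,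
          show m + 1 - 1 = m from by ring,
          show n - (m + 1) = n - m - 1 from by ring]
        rw [hfs]; ring
      · simp only [List.foldl, bodyA, bodyB, ih2,
          show m + 1 - 1 = m from by ring]
        ring

-- ===== VERDICT (by name: the statement is the Claim_ definition above) =====
theorem solve_spec : Claim_equal_solve := by
  intro n k _ hpre
  unfold Spec_solve solve solve_alt
  rcases hpre with ⟨hk1, _⟩ | ⟨hk1, hn2, hk3⟩
  · simp [hk1]
  · rw [if_neg hk1, if_neg hk1]
    by_cases hk : 3 ≤ k
    · rw [if_neg (show ¬ k ≤ 2 by omega)]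
      have hkn : k ≤ n := hk3 hk
      have hle : 2 + (((k - 2).toNat : Nat) : Int) ≤ k := by omega
      have h1 := (loop_inv n k hkn (k - 2).toNat hle).1
      rw [show 2 + (((k - 2).toNat : Nat) : Int) + 1 = k + 1 from by omega,
          show n - (2 + (((k - 2).toNat : Nat) : Int)) = n - k from by omega] at h1
      simpa using h1
    · rw [if_pos (show k ≤ 2 by omega), PySem.List.pyRange_one_eq_nil (by omega)]
      simp
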